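-- pv_equiv track=rewrite | github.com/hanlinsun97/Multiple-Interacting-Spreading-Processes | Exact_DBP_Comp.py | SetFromConfig
-- ===== SOURCE A (Python) =====
-- def SetFromConfig(ele, neighbor):
--
--     #  Config should look like [("A,A"), ("A,B")]. Choose one element such as ("A","A")
--     #  Number of states should equal to the number of neighbors.
--
--     setA = [];
--     setB = [];
--     setS = [];
--     for index in range(len(neighbor)):
--         if ele[index] == "A":
--             setA.append(neighbor[index])
--         elif ele[index] == "B":
--             setB.append(neighbor[index])  ## TODO: Use a loop.
--         elif ele[index] == "S":
--             setS.append(neighbor[index])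
--     return setA, setB, setS
-- ===== SOURCE B (Python) =====
-- def SetFromConfig(ele, neighbor):
--     # Phase 1: materialize (state, neighbor) pairs (same IndexError as A when ele is shorter).
--     pairs = [(ele[index], neighbor[index]) for index in range(len(neighbor))]
--     # Phase 2: three filters over the pair list.
--     setA = [n for s, n in pairs if s == "A"]
--     setB = [n for s, n in pairs if s == "B"]
--     setS = [n for s, n in pairs if s == "S"]
--     return setA, setB, setS
-- ===== Notes on version B (the rewrite author's own statement) =====
-- stated objective: idiomatic
-- what changed: B replaces A's single loop with three if/elif-dispatched accumulators by a two-phase comprehension style: build the (state, neighbor) pair list once, then select each of the three buckets with a filter over the pairs.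
import Mathlib
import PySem

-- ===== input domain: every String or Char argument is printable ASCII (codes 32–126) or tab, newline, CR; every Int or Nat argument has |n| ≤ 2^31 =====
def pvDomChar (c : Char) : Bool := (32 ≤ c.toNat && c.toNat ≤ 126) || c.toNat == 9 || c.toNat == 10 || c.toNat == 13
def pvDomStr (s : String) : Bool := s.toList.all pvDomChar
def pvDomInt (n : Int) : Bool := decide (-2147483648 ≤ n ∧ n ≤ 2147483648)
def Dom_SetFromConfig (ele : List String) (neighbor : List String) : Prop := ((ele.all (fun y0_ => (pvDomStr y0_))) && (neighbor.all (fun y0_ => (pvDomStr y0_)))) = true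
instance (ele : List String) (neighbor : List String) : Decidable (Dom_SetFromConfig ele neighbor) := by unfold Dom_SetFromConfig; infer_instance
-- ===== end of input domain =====

-- B builds the (state, neighbor) pair list once and selects the three buckets with three filters,
-- instead of A's one-pass if/elif dispatch into three accumulators (idiomatic restructuring, same cost).


-- ===== PORT A =====
-- ele[index] / neighbor[index]: index ∈ range(len(neighbor)) is nonnegative, and Pre_ guarantees
-- it is in range for both lists, so pyGetD with a dummy default is exact there.
def SetFromConfig (ele : List String) (neighbor : List String) : List String × List String × List String :=
  (PySem.List.pyRange 0 (neighbor.length : Int) 1).foldl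
    (fun (st : List String × List String × List String) index =>
      if PySem.List.pyGetD ele index "" = "A" then
        (st.1 ++ [PySem.List.pyGetD neighbor index ""], st.2.1, st.2.2)
      else if PySem.List.pyGetD ele index "" = "B" then
        (st.1, st.2.1 ++ [PySem.List.pyGetD neighbor index ""], st.2.2)
      else if PySem.List.pyGetD ele index "" = "S" then
        (st.1, st.2.1, st.2.2 ++ [PySem.List.pyGetD neighbor index ""])
      else st)
    ([], [], [])

-- ===== PORT B =====
def SetFromConfig_alt (ele : List String) (neighbor : List String) : List String × List String × List String :=
  let pairs := (PySem.List.pyRange 0 (neighbor.length : Int) 1).map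
    (fun index => (PySem.List.pyGetD ele index "", PySem.List.pyGetD neighbor index ""))
  (pairs.filterMap (fun p => if p.1 = "A" then some p.2 else none),
   pairs.filterMap (fun p => if p.1 = "B" then some p.2 else none),
   pairs.filterMap (fun p => if p.1 = "S" then some p.2 else none))

-- ===== PRECONDITION & SPEC =====
-- Python A raises IndexError (ele[index]) exactly when neighbor is longer than ele.
def Pre_SetFromConfig (ele : List String) (neighbor : List String) : Prop :=
  neighbor.length ≤ ele.length
instance (ele : List String) (neighbor : List String) : Decidable (Pre_SetFromConfig ele neighbor) := by
  unfold Pre_SetFromConfig; infer_instance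

def pvWitness_SetFromConfig : List String × List String :=
  (["A", "S", "B", "X"], ["n1", "n2", "n3", "n4"])

def Spec_SetFromConfig (ele : List String) (neighbor : List String) (out : List String × List String × List String) : Prop := out = SetFromConfig_alt ele neighbor
instance (ele : List String) (neighbor : List String) (out : List String × List String × List String) : Decidable (Spec_SetFromConfig ele neighbor out) := by unfold Spec_SetFromConfig; infer_instance

-- ===== CLAIM (what is proved, stated in full; the proofs are below) =====
def Claim_equal_SetFromConfig : Prop := ∀ (ele : List String) (neighbor : List String), Dom_SetFromConfig ele neighbor → Pre_SetFromConfig ele neighbor → Spec_SetFromConfig ele neighbor (SetFromConfig ele neighbor)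

-- ===== LEMMAS AND PROOFS =====

-- Loop invariant: folding A's step over any index list appends, to each accumulator,
-- exactly what B's corresponding filter selects from the mapped pair list.
theorem pvFold_eq_filters (ele neighbor : List String) (L : List Int)
    (a b s : List String) :
    L.foldl
      (fun (st : List String × List String × List String) index =>
        if PySem.List.pyGetD ele index "" = "A" then
          (st.1 ++ [PySem.List.pyGetD neighbor index ""], st.2.1, st.2.2)
        else if PySem.List.pyGetD ele index "" = "B" then
          (st.1, st.2.1 ++ [PySem.List.pyGetD neighbor index ""], st.2.2)
        else if PySem.List.pyGetD ele index "" = "S" then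
          (st.1, st.2.1, st.2.2 ++ [PySem.List.pyGetD neighbor index ""])
        else st)
      (a, b, s)
    = (a ++ (L.map (fun index => (PySem.List.pyGetD ele index "", PySem.List.pyGetD neighbor index ""))).filterMap
          (fun p => if p.1 = "A" then some p.2 else none),
       b ++ (L.map (fun index => (PySem.List.pyGetD ele index "", PySem.List.pyGetD neighbor index ""))).filterMap
          (fun p => if p.1 = "B" then some p.2 else none),
       s ++ (L.map (fun index => (PySem.List.pyGetD ele index "", PySem.List.pyGetD neighbor index ""))).filterMap
          (fun p => if p.1 = "S" then some p.2 else none)) := by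
  induction L generalizing a b s with
  | nil => simp
  | cons i L ih =>
      simp only [List.foldl_cons, List.map_cons, List.filterMap_cons]
      by_cases hA : PySem.List.pyGetD ele i "" = "A"
      · simp [hA, ih, List.append_assoc]
      · by_cases hB : PySem.List.pyGetD ele i "" = "B"
        · simp [hB, ih, List.append_assoc]
        · by_cases hS : PySem.List.pyGetD ele i "" = "S"
          · simp [hS, ih, List.append_assoc]
          · simp [hA, hB, hS, ih]

-- ===== VERDICT (by name: the statement is the Claim_ definition above) =====
theorem SetFromConfig_spec : Claim_equal_SetFromConfig := by
  intro ele neighbor _ _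
  unfold Spec_SetFromConfig SetFromConfig SetFromConfig_alt
  rw [pvFold_eq_filters]
  simp
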